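-- pv_equiv track=rewrite | github.com/wenwenwenwenti/FedCCFA | entities/FedCCFA.py | oracle_merging
-- ===== SOURCE A (Python) =====
-- def oracle_merging(_round, ids):
--     if _round < 100:
--         return {
--             0: [ids],
--             1: [ids],
--             2: [ids],
--             3: [ids],
--             4: [ids],
--             5: [ids],
--             6: [ids],
--             7: [ids],
--             8: [ids],
--             9: [ids]
--         }
--     else:
--         return {
--             0: [ids],
--             1: [[_id for _id in ids if 0 <= _id % 10 < 3], [_id for _id in ids if _id % 10 >= 3]],
--             2: [[_id for _id in ids if 0 <= _id % 10 < 3], [_id for _id in ids if _id % 10 >= 3]],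
--             3: [[_id for _id in ids if 3 <= _id % 10 < 6], [_id for _id in ids if not 3 <= _id % 10 < 6]],
--             4: [[_id for _id in ids if 3 <= _id % 10 < 6], [_id for _id in ids if not 3 <= _id % 10 < 6]],
--             5: [[_id for _id in ids if _id % 10 >= 6], [_id for _id in ids if _id % 10 < 6]],
--             6: [[_id for _id in ids if _id % 10 >= 6], [_id for _id in ids if _id % 10 < 6]],
--             7: [ids],
--             8: [ids],
--             9: [ids]
--         }
-- ===== SOURCE B (Python) =====
-- def oracle_merging(_round, ids):
--     if _round < 100:
--         return {k: [ids] for k in range(10)}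
--     low, geq3, mid, notmid, high, lt6 = [], [], [], [], [], []
--     for _id in ids:
--         r = _id % 10
--         (low if r < 3 else geq3).append(_id)
--         (mid if 3 <= r < 6 else notmid).append(_id)
--         (high if r >= 6 else lt6).append(_id)
--     out = {}
--     for k in range(10):
--         if k in (0, 7, 8, 9):
--             out[k] = [ids]
--         elif k in (1, 2):
--             out[k] = [low, geq3]
--         elif k in (3, 4):
--             out[k] = [mid, notmid]
--         else:
--             out[k] = [high, lt6]
--     return out
-- ===== Notes on version B (the rewrite author's own statement) =====
-- stated objective: faster
-- what changed: B makes one pass over ids filling six bucket lists by _id % 10 and then assembles the dict from the buckets, instead of A's twelve separate list comprehensions (each a full scan of ids).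
import Mathlib
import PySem

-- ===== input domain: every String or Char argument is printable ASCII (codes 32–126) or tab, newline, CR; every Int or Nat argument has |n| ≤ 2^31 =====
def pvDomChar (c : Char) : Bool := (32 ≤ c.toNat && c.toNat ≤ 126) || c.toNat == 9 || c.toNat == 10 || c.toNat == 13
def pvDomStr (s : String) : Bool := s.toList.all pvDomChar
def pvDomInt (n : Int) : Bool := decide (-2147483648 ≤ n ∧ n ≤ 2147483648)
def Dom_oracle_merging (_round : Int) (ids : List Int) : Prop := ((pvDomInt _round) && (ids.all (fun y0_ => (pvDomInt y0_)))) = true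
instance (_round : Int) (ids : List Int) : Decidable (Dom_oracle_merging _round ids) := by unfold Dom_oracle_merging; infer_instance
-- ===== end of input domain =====

-- B changes the decomposition: one pass over ids filling six bucket lists instead of
-- twelve separate comprehensions; the dict is then assembled from the buckets.

-- ===== PORT A =====
def oracle_merging (_round : Int) (ids : List Int) : List (Int × List (List Int)) :=
  if _round < 100 then
    [(0, [ids]), (1, [ids]), (2, [ids]), (3, [ids]), (4, [ids]),
     (5, [ids]), (6, [ids]), (7, [ids]), (8, [ids]), (9, [ids])]
  else
    [(0, [ids]),
     (1, [ids.filter (fun i => decide (0 ≤ PySem.Int.mod i 10 ∧ PySem.Int.mod i 10 < 3)),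
          ids.filter (fun i => decide (PySem.Int.mod i 10 ≥ 3))]),
     (2, [ids.filter (fun i => decide (0 ≤ PySem.Int.mod i 10 ∧ PySem.Int.mod i 10 < 3)),
          ids.filter (fun i => decide (PySem.Int.mod i 10 ≥ 3))]),
     (3, [ids.filter (fun i => decide (3 ≤ PySem.Int.mod i 10 ∧ PySem.Int.mod i 10 < 6)),
          ids.filter (fun i => !decide (3 ≤ PySem.Int.mod i 10 ∧ PySem.Int.mod i 10 < 6))]),
     (4, [ids.filter (fun i => decide (3 ≤ PySem.Int.mod i 10 ∧ PySem.Int.mod i 10 < 6)),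
          ids.filter (fun i => !decide (3 ≤ PySem.Int.mod i 10 ∧ PySem.Int.mod i 10 < 6))]),
     (5, [ids.filter (fun i => decide (PySem.Int.mod i 10 ≥ 6)),
          ids.filter (fun i => decide (PySem.Int.mod i 10 < 6))]),
     (6, [ids.filter (fun i => decide (PySem.Int.mod i 10 ≥ 6)),
          ids.filter (fun i => decide (PySem.Int.mod i 10 < 6))]),
     (7, [ids]), (8, [ids]), (9, [ids])]

-- ===== PORT B =====
-- one pass: six accumulators, each id appended to one of each pair by _id % 10
def omBuckets (ids : List Int) :
    List Int × List Int × List Int × List Int × List Int × List Int :=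
  ids.foldl
    (fun st i =>
      let (low, geq3, mid, notmid, high, lt6) := st
      let r := PySem.Int.mod i 10
      let (low, geq3) := if r < 3 then (low ++ [i], geq3) else (low, geq3 ++ [i])
      let (mid, notmid) := if 3 ≤ r ∧ r < 6 then (mid ++ [i], notmid) else (mid, notmid ++ [i])
      let (high, lt6) := if r ≥ 6 then (high ++ [i], lt6) else (high, lt6 ++ [i])
      (low, geq3, mid, notmid, high, lt6))
    ([], [], [], [], [], [])

def oracle_merging_alt (_round : Int) (ids : List Int) : List (Int × List (List Int)) :=
  if _round < 100 then
    (PySem.List.pyRange 0 10 1).map (fun k => (k, [ids]))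
  else
    let (low, geq3, mid, notmid, high, lt6) := omBuckets ids
    (PySem.List.pyRange 0 10 1).foldl
      (fun out k =>
        out ++ [(k,
          if k = 0 ∨ k = 7 ∨ k = 8 ∨ k = 9 then [ids]
          else if k = 1 ∨ k = 2 then [low, geq3]
          else if k = 3 ∨ k = 4 then [mid, notmid]
          else [high, lt6])]) []

-- ===== PRECONDITION & SPEC =====
def Spec_oracle_merging (_round : Int) (ids : List Int) (out : List (Int × List (List Int))) : Prop := out = oracle_merging_alt _round ids
instance (_round : Int) (ids : List Int) (out : List (Int × List (List Int))) : Decidable (Spec_oracle_merging _round ids out) := by unfold Spec_oracle_merging; infer_instance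

-- ===== CLAIM (what is proved, stated in full; the proofs are below) =====
def Claim_equal_oracle_merging : Prop := ∀ (_round : Int) (ids : List Int), Dom_oracle_merging _round ids → Spec_oracle_merging _round ids (oracle_merging _round ids)

-- ===== LEMMAS AND PROOFS =====

theorem mod10 (i : Int) : PySem.Int.mod i 10 = i % 10 :=
  PySem.Int.mod_eq_emod_of_pos (by norm_num)

theorem omBuckets_spec (ids : List Int) :
    omBuckets ids =
      (ids.filter (fun i => decide (i % 10 < 3)),
       ids.filter (fun i => !decide (i % 10 < 3)),
       ids.filter (fun i => decide (3 ≤ i % 10 ∧ i % 10 < 6)),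
       ids.filter (fun i => !decide (3 ≤ i % 10 ∧ i % 10 < 6)),
       ids.filter (fun i => decide (i % 10 ≥ 6)),
       ids.filter (fun i => !decide (i % 10 ≥ 6))) := by
  unfold omBuckets
  simp only [mod10]
  suffices h : ∀ (l : List Int) (a b c d e f : List Int),
      l.foldl
        (fun st i =>
          let (low, geq3, mid, notmid, high, lt6) := st
          let r := i % 10
          let (low, geq3) := if r < 3 then (low ++ [i], geq3) else (low, geq3 ++ [i])
          let (mid, notmid) := if 3 ≤ r ∧ r < 6 then (mid ++ [i], notmid) else (mid, notmid ++ [i])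
          let (high, lt6) := if r ≥ 6 then (high ++ [i], lt6) else (high, lt6 ++ [i])
          (low, geq3, mid, notmid, high, lt6))
        (a, b, c, d, e, f) =
      (a ++ l.filter (fun i => decide (i % 10 < 3)),
       b ++ l.filter (fun i => !decide (i % 10 < 3)),
       c ++ l.filter (fun i => decide (3 ≤ i % 10 ∧ i % 10 < 6)),
       d ++ l.filter (fun i => !decide (3 ≤ i % 10 ∧ i % 10 < 6)),
       e ++ l.filter (fun i => decide (i % 10 ≥ 6)),
       f ++ l.filter (fun i => !decide (i % 10 ≥ 6))) by
    simpa using h ids [] [] [] [] [] []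
  intro l
  induction l with
  | nil => simp
  | cons x xs ih =>
    intro a b c d e f
    simp only [List.foldl_cons, List.filter_cons]
    have hb : 0 ≤ x % 10 ∧ x % 10 < 10 :=
      ⟨Int.emod_nonneg x (by norm_num), Int.emod_lt_of_pos x (by norm_num)⟩
    by_cases h1 : x % 10 < 3
    · have h2 : ¬ 3 ≤ x % 10 := by omega
      have h3 : x % 10 < 6 := by omega
      have h4 : ¬ 6 ≤ x % 10 := by omega
      simp [h1, h2, h3, h4, ih, List.append_assoc]
    · by_cases h3 : x % 10 < 6
      · have h2 : 3 ≤ x % 10 := by omega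
        have h4 : ¬ 6 ≤ x % 10 := by omega
        simp [h1, h2, h3, h4, ih, List.append_assoc]
      · have h2 : 3 ≤ x % 10 := by omega
        have h4 : 6 ≤ x % 10 := by omega
        simp [h1, h2, h3, h4, ih, List.append_assoc]

theorem filter_low_eq (ids : List Int) :
    ids.filter (fun i => decide (0 ≤ i % 10 ∧ i % 10 < 3)) =
    ids.filter (fun i => decide (i % 10 < 3)) := by
  apply List.filter_congr
  intro i _
  have : 0 ≤ i % 10 := Int.emod_nonneg i (by norm_num)
  simp [this]

theorem filter_geq3_eq (ids : List Int) :
    ids.filter (fun i => decide (i % 10 ≥ 3)) =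
    ids.filter (fun i => !decide (i % 10 < 3)) := by
  apply List.filter_congr
  intro i _
  by_cases h : i % 10 < 3
  · have h2 : ¬ i % 10 ≥ 3 := by omega
    simp [h, h2]
  · have h2 : i % 10 ≥ 3 := by omega
    simp [h, h2]

theorem filter_lt6_eq (ids : List Int) :
    ids.filter (fun i => decide (i % 10 < 6)) =
    ids.filter (fun i => !decide (i % 10 ≥ 6)) := by
  apply List.filter_congr
  intro i _
  by_cases h : i % 10 < 6
  · have h2 : ¬ i % 10 ≥ 6 := by omega
    simp [h, h2]
  · have h2 : i % 10 ≥ 6 := by omega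
    simp [h, h2]

theorem pyRange10 : PySem.List.pyRange 0 10 1 = [0,1,2,3,4,5,6,7,8,9] := by decide

-- ===== VERDICT (by name: the statement is the Claim_ definition above) =====
theorem oracle_merging_spec : Claim_equal_oracle_merging := by
  intro _round ids _
  unfold Spec_oracle_merging oracle_merging oracle_merging_alt
  by_cases hr : _round < 100
  · simp [hr, pyRange10]
  · simp only [hr, if_false, omBuckets_spec, mod10, pyRange10, List.foldl_cons,
      List.foldl_nil, List.map_cons, List.map_nil]
    rw [filter_low_eq, filter_geq3_eq, filter_lt6_eq]
    norm_num
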